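-- pv_equiv track=rewrite | github.com/r7wang/algorithm | src/array/two_dim/__init__.py | make_2d_array_yx_seeded_col_order_using_iter
-- ===== SOURCE A (Python) =====
-- from typing import List, Any, Iterator
--
-- def seed_2d_array_yx(width: int, height: int) -> List:
--     arr = []
--     for _ in range(0, height):
--         # List generation is a pretty neat trick.
--         arr.append([-1] * width)
--     return arr
--
-- def make_2d_array_yx_seeded_col_order_using_iter(items: List, width: int, height: int) -> List:
--     """
--     Properties:
--         - initially seeded with None
--         - applies items in column order, top to bottom
--         - uses an iterator to apply as many items as possible
--     """
--
--     arr = seed_2d_array_yx(width, height)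
--     items_iter = iter(items)
--     try:
--         for x in range(0, width):
--             for y in range(0, height):
--                 arr[y][x] = next(items_iter)
--     except StopIteration:
--         pass
--     return arr
-- ===== SOURCE B (Python) =====
-- def make_2d_array_yx_seeded_col_order_using_iter(items, width, height):
--     # Build each cell directly: cell (y, x) is items[x*height + y] when that
--     # index exists, else the -1 seed. No seeding pass, no mutation, no iterator.
--     items = list(items)
--     n = len(items)
--     return [[items[x * height + y] if x * height + y < n else -1
--              for x in range(width)]
--             for y in range(height)]
-- ===== Notes on version B (the rewrite author's own statement) =====
-- stated objective: simpler
-- what changed: Replaces the seed-then-mutate nested loops with exception-based exit by a single nested comprehension that computes each cell directly from its column-major index x*height+y, with no seeding pass, no mutation and no iterator.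
import Mathlib
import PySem

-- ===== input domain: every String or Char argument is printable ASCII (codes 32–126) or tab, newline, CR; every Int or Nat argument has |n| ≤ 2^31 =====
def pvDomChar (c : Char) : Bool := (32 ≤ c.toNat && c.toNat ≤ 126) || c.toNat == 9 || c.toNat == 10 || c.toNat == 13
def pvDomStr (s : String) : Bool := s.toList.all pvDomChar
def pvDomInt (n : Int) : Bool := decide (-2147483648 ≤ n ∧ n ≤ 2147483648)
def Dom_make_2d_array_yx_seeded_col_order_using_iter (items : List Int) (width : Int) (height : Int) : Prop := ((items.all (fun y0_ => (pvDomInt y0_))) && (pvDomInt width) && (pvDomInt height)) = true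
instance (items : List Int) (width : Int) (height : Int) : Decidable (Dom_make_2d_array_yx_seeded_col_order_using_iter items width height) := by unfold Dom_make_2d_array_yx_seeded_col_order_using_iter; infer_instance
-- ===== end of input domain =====

-- B replaces A's seed-then-mutate nested loops (with exception-based exit) by a
-- direct nested comprehension computing each cell from its column-major index
-- (objective: simpler). Same return value; A mutates only lists it created itself.

-- ===== PORT A =====
-- seed_2d_array_yx: arr = []; for _ in range(0, height): arr.append([-1]*width)
def seed_2d_array_yx (width : Int) (height : Int) : List (List Int) :=
  (List.range height.toNat).foldl (fun arr _ => arr ++ [List.replicate width.toNat (-1)]) []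

-- inner loop `for y in range(0, height): arr[y][x] = next(items_iter)`;
-- returns the updated arr and `some` remaining iterator, or `none` on StopIteration
def pvFillColA : List Nat → Nat → List (List Int) → List Int → (List (List Int)) × Option (List Int)
  | [], _, arr, it => (arr, some it)
  | _ :: _, _, arr, [] => (arr, none)
  | y :: ys, x, arr, v :: rest => pvFillColA ys x (arr.modify y (fun row => row.set x v)) rest

-- outer loop `for x in range(0, width)`, aborted entirely when StopIteration was raised
def pvFillAllA (h : Nat) : List Nat → List (List Int) → List Int → List (List Int)
  | [], arr, _ => arr
  | x :: xs, arr, it =>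
    match pvFillColA (List.range h) x arr it with
    | (arr', some it') => pvFillAllA h xs arr' it'
    | (arr', none) => arr'

def make_2d_array_yx_seeded_col_order_using_iter (items : List Int) (width : Int) (height : Int) : List (List Int) :=
  pvFillAllA height.toNat (List.range width.toNat) (seed_2d_array_yx width height) items

-- ===== PORT B =====
def make_2d_array_yx_seeded_col_order_using_iter_alt (items : List Int) (width : Int) (height : Int) : List (List Int) :=
  (List.range height.toNat).map (fun y =>
    (List.range width.toNat).map (fun x =>
      if x * height.toNat + y < items.length then items.getD (x * height.toNat + y) 0 else -1))

-- ===== PRECONDITION & SPEC =====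
def Spec_make_2d_array_yx_seeded_col_order_using_iter (items : List Int) (width : Int) (height : Int) (out : List (List Int)) : Prop := out = make_2d_array_yx_seeded_col_order_using_iter_alt items width height
instance (items : List Int) (width : Int) (height : Int) (out : List (List Int)) : Decidable (Spec_make_2d_array_yx_seeded_col_order_using_iter items width height out) := by unfold Spec_make_2d_array_yx_seeded_col_order_using_iter; infer_instance

-- ===== CLAIM (what is proved, stated in full; the proofs are below) =====
def Claim_equal_make_2d_array_yx_seeded_col_order_using_iter : Prop := ∀ (items : List Int) (width : Int) (height : Int), Dom_make_2d_array_yx_seeded_col_order_using_iter items width height → Spec_make_2d_array_yx_seeded_col_order_using_iter items width height (make_2d_array_yx_seeded_col_order_using_iter items width height)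

-- ===== LEMMAS AND PROOFS =====

-- the grid after the first `c` items (column-major) have been written
def partGrid (items : List Int) (w h c : Nat) : List (List Int) :=
  (List.range h).map (fun y => (List.range w).map (fun x =>
    if x * h + y < min c items.length then items.getD (x * h + y) 0 else (-1 : Int)))

theorem partGrid_min (items : List Int) (w h c : Nat) :
    partGrid items w h c = partGrid items w h (min c items.length) := by
  unfold partGrid
  simp

theorem colmajor_inj {h x y x' y' : Nat} (hy : y < h) (hy' : y' < h)
    (he : x * h + y = x' * h + y') : x = x' ∧ y = y' := by
  have hpos : 0 < h := by omega
  have h1 : (x * h + y) / h = x := by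
    rw [Nat.add_comm, Nat.add_mul_div_right _ _ hpos, Nat.div_eq_of_lt hy, Nat.zero_add]
  have h2 : (x' * h + y') / h = x' := by
    rw [Nat.add_comm, Nat.add_mul_div_right _ _ hpos, Nat.div_eq_of_lt hy', Nat.zero_add]
  have hx : x = x' := by rw [← h1, ← h2, he]
  refine ⟨hx, ?_⟩
  subst hx
  omega

theorem partGrid_set (items : List Int) (w h x y0 : Nat) (_hx : x < w) (hy : y0 < h)
    (hc : x * h + y0 < items.length) :
    (partGrid items w h (x * h + y0)).modify y0 (fun row => row.set x (items.getD (x * h + y0) 0))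
      = partGrid items w h (x * h + y0 + 1) := by
  apply List.ext_getElem
  · simp [partGrid]
  · intro y hy1 hy2
    have hyh : y < h := by simpa [partGrid] using hy2
    rw [List.getElem_modify]
    by_cases hyy : y0 = y
    · subst hyy
      rw [if_pos rfl]
      apply List.ext_getElem
      · simp [partGrid]
      · intro x' hx1 hx2
        have hxw : x' < w := by simpa [partGrid] using hx2
        simp only [partGrid, List.getElem_map, List.getElem_range, List.getElem_set]
        by_cases hxx : x = x'
        · subst hxx
          rw [if_pos rfl, if_pos (by omega)]
        · rw [if_neg hxx]
          have hne : x' * h + y0 ≠ x * h + y0 := fun he => hxx ((colmajor_inj hy hy he).1).symm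
          by_cases hc2 : x' * h + y0 < min (x * h + y0) items.length
          · rw [if_pos hc2, if_pos (by omega)]
          · rw [if_neg hc2, if_neg (by omega)]
    · rw [if_neg hyy]
      simp only [partGrid, List.getElem_map, List.getElem_range]
      apply List.map_congr_left
      intro x' hx'
      have hne : x' * h + y ≠ x * h + y0 := fun he => hyy ((colmajor_inj hyh hy he).2).symm
      by_cases hc2 : x' * h + y < min (x * h + y0) items.length
      · rw [if_pos hc2, if_pos (by omega)]
      · rw [if_neg hc2, if_neg (by omega)]

theorem fillColA_eq (items : List Int) (w h x : Nat) (hx : x < w) :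
    ∀ (k y0 : Nat), y0 + k ≤ h →
    pvFillColA (List.range' y0 k) x (partGrid items w h (x * h + y0)) (items.drop (x * h + y0))
      = (partGrid items w h (x * h + y0 + k),
         if k ≤ items.length - (x * h + y0) then some (items.drop (x * h + y0 + k)) else none) := by
  intro k
  induction k with
  | zero => intro y0 _; simp [pvFillColA]
  | succ k ih =>
    intro y0 hk
    rw [List.range'_succ]
    rcases hd : items.drop (x * h + y0) with _ | ⟨v, rest⟩
    · have hlen : items.length ≤ x * h + y0 := by
        have hl := congrArg List.length hd
        simp at hl
        omega
      simp only [pvFillColA]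
      have hg : partGrid items w h (x * h + y0) = partGrid items w h (x * h + y0 + (k + 1)) := by
        rw [partGrid_min items w h (x * h + y0), partGrid_min items w h (x * h + y0 + (k + 1))]
        congr 1
        omega
      rw [hg, if_neg (by omega)]
    · have hlt : x * h + y0 < items.length := by
        by_contra hcon
        rw [List.drop_eq_nil_of_le (by omega)] at hd
        simp at hd
      have hcd := List.getElem_cons_drop (as := items) hlt
      rw [hd] at hcd
      have hv : v = items.getD (x * h + y0) 0 := by
        have h1 : v = items[x * h + y0] := (List.cons.injEq _ _ _ _ ▸ hcd.symm).1
        rw [h1]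
        simp [List.getD_eq_getElem?_getD, List.getElem?_eq_getElem hlt]
      have hrest : rest = items.drop (x * h + y0 + 1) := by
        exact (List.cons.injEq _ _ _ _ ▸ hcd.symm).2
      simp only [pvFillColA]
      rw [hv, partGrid_set items w h x y0 hx (by omega) hlt]
      have hrec := ih (y0 + 1) (by omega)
      have harith : x * h + (y0 + 1) = x * h + y0 + 1 := by omega
      rw [harith] at hrec
      rw [hrest, hrec]
      simp only [Prod.mk.injEq]
      constructor
      · congr 1
        omega
      · by_cases hle : k + 1 ≤ items.length - (x * h + y0)
        · rw [if_pos (by omega), if_pos hle]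
          congr 2
          omega
        · rw [if_neg (by omega), if_neg hle]

theorem fillAllA_eq (items : List Int) (w h : Nat) :
    ∀ (m x0 : Nat), x0 + m ≤ w →
    pvFillAllA h (List.range' x0 m) (partGrid items w h (x0 * h)) (items.drop (x0 * h))
      = partGrid items w h ((x0 + m) * h) := by
  intro m
  induction m with
  | zero => intro x0 _; simp [pvFillAllA]
  | succ m ih =>
    intro x0 hm
    rw [List.range'_succ]
    have hcol := fillColA_eq items w h x0 (by omega) h 0 (by omega)
    simp only [Nat.add_zero] at hcol
    by_cases hle : h ≤ items.length - x0 * h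
    · rw [if_pos hle] at hcol
      simp only [pvFillAllA, List.range_eq_range', hcol]
      have h2 : x0 * h + h = (x0 + 1) * h := by ring
      rw [h2, ih (x0 + 1) (by omega)]
      congr 1
      ring
    · rw [if_neg hle] at hcol
      simp only [pvFillAllA, List.range_eq_range', hcol]
      rw [partGrid_min items w h (x0 * h + h), partGrid_min items w h ((x0 + (m + 1)) * h)]
      have h1 : (x0 + 1) * h ≤ (x0 + (m + 1)) * h := Nat.mul_le_mul (by omega) (Nat.le_refl h)
      have h2 : x0 * h + h = (x0 + 1) * h := by ring
      congr 1
      omega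

theorem seed_eq (items : List Int) (width height : Int) :
    seed_2d_array_yx width height = partGrid items width.toNat height.toNat 0 := by
  unfold seed_2d_array_yx partGrid
  have hrep : ∀ n : Nat, (List.range n).foldl
      (fun arr _ => arr ++ [List.replicate width.toNat (-1)]) ([] : List (List Int))
      = List.replicate n (List.replicate width.toNat (-1)) := by
    intro n
    induction n with
    | zero => simp
    | succ n ih => rw [List.range_succ, List.foldl_append, ih, List.replicate_succ']; simp
  rw [hrep]
  apply List.ext_getElem
  · simp
  · intro y h1 h2
    simp only [List.getElem_replicate, List.getElem_map, List.getElem_range]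
    apply List.ext_getElem
    · simp
    · intro x hx1 hx2
      simp

theorem alt_eq_partGrid (items : List Int) (width height : Int) :
    make_2d_array_yx_seeded_col_order_using_iter_alt items width height
      = partGrid items width.toNat height.toNat (width.toNat * height.toNat) := by
  unfold make_2d_array_yx_seeded_col_order_using_iter_alt partGrid
  apply List.map_congr_left
  intro y hy
  simp only [List.mem_range] at hy
  apply List.map_congr_left
  intro x hx
  simp only [List.mem_range] at hx
  have hb : x * height.toNat + y < width.toNat * height.toNat := by
    calc x * height.toNat + y < x * height.toNat + height.toNat := by omega
    _ = (x + 1) * height.toNat := by ring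
    _ ≤ width.toNat * height.toNat := Nat.mul_le_mul (by omega) (Nat.le_refl _)
  by_cases hcond : x * height.toNat + y < items.length
  · rw [if_pos hcond, if_pos (by omega)]
  · rw [if_neg hcond, if_neg (by omega)]

-- ===== VERDICT (by name: the statement is the Claim_ definition above) =====
theorem make_2d_array_yx_seeded_col_order_using_iter_spec : Claim_equal_make_2d_array_yx_seeded_col_order_using_iter := by
  intro items width height _
  unfold Spec_make_2d_array_yx_seeded_col_order_using_iter
  unfold make_2d_array_yx_seeded_col_order_using_iter
  rw [seed_eq items width height]
  have hmain := fillAllA_eq items width.toNat height.toNat width.toNat 0 (by omega)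
  simp only [Nat.zero_mul, Nat.zero_add, List.drop_zero, ← List.range_eq_range'] at hmain
  rw [hmain, alt_eq_partGrid]
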